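-- pv_equiv track=rewrite | github.com/romgenie/tic-tak-toe-2 | src/ttt/policy_targets.py | compute_action_ranks
-- ===== SOURCE A (Python) =====
-- from typing import Dict, List, Optional, Tuple
--
-- def compute_action_ranks(sol: Dict) -> Tuple[List[Optional[int]], List[Optional[int]], List[Optional[int]]]:
--     order_map = {+1: 2, 0: 1, -1: 0}
--     q_values = list(sol['q_values'])
--     dtts = list(sol['dtt_action'])
--     legal_idxs = [i for i, q in enumerate(q_values) if q is not None]
--
--     def key_for(i: int):
--         q = q_values[i]
--         if q is None:
--             return (float('inf'), float('inf'), i)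
--         primary = -order_map[q]
--         d = dtts[i]
--         d_val = 10 ** 9 if d is None else d
--         secondary = -d_val if q == -1 else d_val
--         return (primary, secondary, i)
--
--     sorted_moves = sorted(legal_idxs, key=key_for)
--     ranks = [None] * 9
--     value_regret = [None] * 9
--     dtt_regret = [None] * 9
--     if not sorted_moves:
--         return ranks, value_regret, dtt_regret
--     best_q = q_values[sorted_moves[0]]
--     best_dtts_same_q = [dtts[i] for i in legal_idxs if q_values[i] == best_q and dtts[i] is not None]
--     if best_dtts_same_q:
--         if best_q == -1:
--             best_dtt_pref = max(best_dtts_same_q)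
--         else:
--             best_dtt_pref = min(best_dtts_same_q)
--     else:
--         best_dtt_pref = None
--     prev_key = None
--     current_rank = 0
--     for i in sorted_moves:
--         k = key_for(i)[:2]
--         if k != prev_key:
--             current_rank += 1
--             prev_key = k
--         ranks[i] = current_rank
--         value_regret[i] = order_map[best_q] - order_map[q_values[i]]
--         if q_values[i] == best_q and dtts[i] is not None and best_dtt_pref is not None:
--             if best_q == -1:
--                 dtt_regret[i] = max(0, best_dtt_pref - dtts[i])
--             else:
--                 dtt_regret[i] = max(0, dtts[i] - best_dtt_pref)
--     return ranks, value_regret, dtt_regret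
-- ===== SOURCE B (Python) =====
-- # Alternative decomposition: no sort and no stateful rank walk. Each legal move's
-- # (primary, secondary) sort key is packed once into a single integer (safe: |dtt| is
-- # 32-bit on the stated domain, far below the 2**40 packing radix); dense ranks come
-- # from counting strictly-smaller distinct keys, the best q from a keyed max.
-- def compute_action_ranks(sol):
--     order = {1: 2, 0: 1, -1: 0}
--     q_values = list(sol['q_values'])
--     dtts = list(sol['dtt_action'])
--     ranks = [None] * 9
--     value_regret = [None] * 9
--     dtt_regret = [None] * 9
--     moves = []
--     for i, q in enumerate(q_values):
--         if q is not None: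
--             d = dtts[i]
--             d_val = 10 ** 9 if d is None else d
--             sec = -d_val if q == -1 else d_val
--             moves.append((i, q, d, -order[q] * 2 ** 40 + sec))
--     if not moves:
--         return ranks, value_regret, dtt_regret
--     keys = set(k for _, _, _, k in moves)
--     best_q = max((q for _, q, _, _ in moves), key=order.get)
--     best_ds = [d for _, q, d, _ in moves if q == best_q and d is not None]
--     pref = (max(best_ds) if best_q == -1 else min(best_ds)) if best_ds else None
--     for i, q, d, k in moves:
--         ranks[i] = 1 + sum(1 for k2 in keys if k2 < k)
--         value_regret[i] = order[best_q] - order[q]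
--         if q == best_q and d is not None and pref is not None:
--             dtt_regret[i] = max(0, pref - d) if best_q == -1 else max(0, d - pref)
--     return ranks, value_regret, dtt_regret
-- ===== Notes on version B (the rewrite author's own statement) =====
-- stated objective: alternative
-- what changed: A sorts the legal moves by a (primary, secondary, index) key and walks the sorted list with prev_key/current_rank state; B never sorts: it builds each legal move's record (index, q, dtt, packed integer key) once, takes best_q by a keyed max, and assigns each dense rank directly as 1 + the count of strictly smaller distinct keys.
import Mathlib
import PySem

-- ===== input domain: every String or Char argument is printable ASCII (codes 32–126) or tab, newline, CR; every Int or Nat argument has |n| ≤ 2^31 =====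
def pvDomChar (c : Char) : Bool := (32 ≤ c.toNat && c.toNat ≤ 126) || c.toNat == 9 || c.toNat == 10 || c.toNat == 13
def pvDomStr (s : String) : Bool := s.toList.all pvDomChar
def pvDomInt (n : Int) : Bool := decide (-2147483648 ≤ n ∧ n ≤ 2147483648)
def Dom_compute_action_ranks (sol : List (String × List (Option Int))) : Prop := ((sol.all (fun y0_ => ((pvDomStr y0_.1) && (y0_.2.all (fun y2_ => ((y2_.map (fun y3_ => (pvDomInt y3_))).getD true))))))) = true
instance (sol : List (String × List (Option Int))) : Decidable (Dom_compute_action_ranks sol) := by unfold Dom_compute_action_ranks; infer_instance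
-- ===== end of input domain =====

-- B replaces A's sort-then-stateful-rank-walk by a sortless decomposition (records built once,
-- dense rank = count of strictly smaller distinct packed keys, best move by a keyed max).

-- ===== PORT A =====
-- sol['q_values'] / sol['dtt_action']  (shared by both ports; KeyError excluded by Pre_)
def pvQs (sol : List (String × List (Option Int))) : List (Option Int) :=
  (PySem.Dict.get? ⟨sol⟩ "q_values").getD []
def pvDs (sol : List (String × List (Option Int))) : List (Option Int) :=
  (PySem.Dict.get? ⟨sol⟩ "dtt_action").getD []
-- order_map = {+1: 2, 0: 1, -1: 0}; order_map[q] (KeyError for other q excluded by Pre_)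
def pvOrderMap : PySem.Dict Int Int := ⟨[(1, 2), (0, 1), (-1, 0)]⟩
def pvOrd (q : Int) : Int := (PySem.Dict.get? pvOrderMap q).getD 0

-- key_for(i)[:2]; the q-is-None branch (float inf) is unreachable: key_for is applied to legal indices only
def pvKeyA (qs ds : List (Option Int)) (i : Int) : Int × Int :=
  match (PySem.List.pyGet? qs i).getD none with
  | some q =>
      let dval : Int := match (PySem.List.pyGet? ds i).getD none with
        | none => 1000000000
        | some d => d
      (-(pvOrd q), if q = -1 then -dval else dval)
  | none => (0, 0)

-- the body of A's 'for i in sorted_moves' loop; state = (prev_key, current_rank, ranks, value_regret, dtt_regret)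
def pvStepA (qs ds : List (Option Int)) (bq : Int) (pref : Option Int)
    (st : Option (Int × Int) × Int × List (Option Int) × List (Option Int) × List (Option Int)) (i : Int) :
    Option (Int × Int) × Int × List (Option Int) × List (Option Int) × List (Option Int) :=
  let k := pvKeyA qs ds i
  let (cur, prev) := if some k ≠ st.1 then (st.2.1 + 1, some k) else (st.2.1, st.1)
  let rk := PySem.List.pySetD st.2.2.1 i (some cur)
  let q : Int := ((PySem.List.pyGet? qs i).getD none).getD 0
  let vr := PySem.List.pySetD st.2.2.2.1 i (some (pvOrd bq - pvOrd q))
  let d := (PySem.List.pyGet? ds i).getD none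
  let dr := if (PySem.List.pyGet? qs i).getD none = some bq ∧ d ≠ none ∧ pref ≠ none then
      PySem.List.pySetD st.2.2.2.2 i
        (some (if bq = -1 then max 0 (pref.getD 0 - d.getD 0) else max 0 (d.getD 0 - pref.getD 0)))
    else st.2.2.2.2
  (prev, cur, rk, vr, dr)

def compute_action_ranks (sol : List (String × List (Option Int))) :
    List (Option Int) × List (Option Int) × List (Option Int) :=
  let qs := pvQs sol
  let ds := pvDs sol
  let legal := ((PySem.List.enumerate qs 0).filter (fun p => p.2.isSome)).map (fun p => p.1)
  let sm := PySem.List.sorted2 legal (fun i => (pvKeyA qs ds i).1) (fun i => (pvKeyA qs ds i).2)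
  let ranks0 : List (Option Int) := List.replicate 9 none
  if sm = [] then (ranks0, ranks0, ranks0) else
  let bq : Int := ((PySem.List.pyGet? qs (sm.headD 0)).getD none).getD 0
  let bestDs : List Int := legal.filterMap (fun i =>
      if (PySem.List.pyGet? qs i).getD none = some bq then (PySem.List.pyGet? ds i).getD none else none)
  let pref : Option Int := if bestDs = [] then none
      else some (if bq = -1 then (PySem.List.max? bestDs (fun d => d)).getD 0
                 else (PySem.List.min? bestDs (fun d => d)).getD 0)
  let st := sm.foldl (pvStepA qs ds bq pref) (none, 0, ranks0, ranks0, ranks0)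
  (st.2.2.1, st.2.2.2.1, st.2.2.2.2)

-- ===== PORT B =====
-- one record per legal move: (i, q, dtt, packed key); packing is exact for |dtt| < 2^40
def pvRecB (ds : List (Option Int)) (i q : Int) : Int × Int × Option Int × Int :=
  let d := (PySem.List.pyGet? ds i).getD none
  let dval : Int := match d with | none => 1000000000 | some x => x
  let sec := if q = -1 then -dval else dval
  (i, q, d, -(pvOrd q) * 2 ^ 40 + sec)

-- the body of B's final loop; state = (ranks, value_regret, dtt_regret)
def pvStepB (keys : PySem.Set Int) (bq : Int) (pref : Option Int)
    (st : List (Option Int) × List (Option Int) × List (Option Int)) (m : Int × Int × Option Int × Int) :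
    List (Option Int) × List (Option Int) × List (Option Int) :=
  let rk := PySem.List.pySetD st.1 m.1 (some (1 + (keys.countP (fun k2 => decide (k2 < m.2.2.2)) : Int)))
  let vr := PySem.List.pySetD st.2.1 m.1 (some (pvOrd bq - pvOrd m.2.1))
  let dr := if m.2.1 = bq ∧ m.2.2.1 ≠ none ∧ pref ≠ none then
      PySem.List.pySetD st.2.2 m.1
        (some (if bq = -1 then max 0 (pref.getD 0 - m.2.2.1.getD 0) else max 0 (m.2.2.1.getD 0 - pref.getD 0)))
    else st.2.2
  (rk, vr, dr)

def compute_action_ranks_alt (sol : List (String × List (Option Int))) :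
    List (Option Int) × List (Option Int) × List (Option Int) :=
  let qs := pvQs sol
  let ds := pvDs sol
  let moves := (PySem.List.enumerate qs 0).foldl (fun acc p =>
      match p.2 with
      | none => acc
      | some q => acc ++ [pvRecB ds p.1 q]) []
  let ranks0 : List (Option Int) := List.replicate 9 none
  if moves = [] then (ranks0, ranks0, ranks0) else
  let keys := PySem.Set.ofList (moves.map (fun m => m.2.2.2))
  let bq : Int := (PySem.List.max? (moves.map (fun m => m.2.1)) pvOrd).getD 0
  let bestDs : List Int := moves.filterMap (fun m => if m.2.1 = bq then m.2.2.1 else none)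
  let pref : Option Int := if bestDs = [] then none
      else some (if bq = -1 then (PySem.List.max? bestDs (fun d => d)).getD 0
                 else (PySem.List.min? bestDs (fun d => d)).getD 0)
  moves.foldl (pvStepB keys bq pref) (ranks0, ranks0, ranks0)

-- ===== PRECONDITION & SPEC =====
-- Pre_ = exactly the inputs where A returns: both dict keys present (else KeyError), and every
-- legal (non-None) q is one of -1/0/1 (else KeyError in order_map) with its index inside
-- dtt_action (else IndexError in key_for) and below 9 (else IndexError in ranks[i] = ...).
def Pre_compute_action_ranks (sol : List (String × List (Option Int))) : Prop :=
  PySem.Dict.get? (⟨sol⟩ : PySem.Dict String (List (Option Int))) "q_values" ≠ none ∧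
  PySem.Dict.get? (⟨sol⟩ : PySem.Dict String (List (Option Int))) "dtt_action" ≠ none ∧
  ∀ n : Fin ((PySem.Dict.get? (⟨sol⟩ : PySem.Dict String (List (Option Int))) "q_values").getD []).length,
    ((PySem.Dict.get? (⟨sol⟩ : PySem.Dict String (List (Option Int))) "q_values").getD [])[n] ≠ none →
      (((PySem.Dict.get? (⟨sol⟩ : PySem.Dict String (List (Option Int))) "q_values").getD [])[n] = some (-1) ∨
       ((PySem.Dict.get? (⟨sol⟩ : PySem.Dict String (List (Option Int))) "q_values").getD [])[n] = some 0 ∨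
       ((PySem.Dict.get? (⟨sol⟩ : PySem.Dict String (List (Option Int))) "q_values").getD [])[n] = some 1) ∧
      (n : Nat) < ((PySem.Dict.get? (⟨sol⟩ : PySem.Dict String (List (Option Int))) "dtt_action").getD []).length ∧
      (n : Nat) < 9
instance (sol : List (String × List (Option Int))) : Decidable (Pre_compute_action_ranks sol) := by
  unfold Pre_compute_action_ranks; infer_instance

def pvWitness_compute_action_ranks : (List (String × List (Option Int))) :=
  [("q_values", [some 1, none, some (-1)]), ("dtt_action", [some 3, none, some 2])]

def Spec_compute_action_ranks (sol : List (String × List (Option Int)))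
    (out : List (Option Int) × List (Option Int) × List (Option Int)) : Prop :=
  out = compute_action_ranks_alt sol
instance (sol : List (String × List (Option Int)))
    (out : List (Option Int) × List (Option Int) × List (Option Int)) :
    Decidable (Spec_compute_action_ranks sol out) := by
  unfold Spec_compute_action_ranks; infer_instance

-- ===== CLAIM (what is proved, stated in full; the proofs are below) =====
def Claim_equal_compute_action_ranks : Prop :=
  ∀ (sol : List (String × List (Option Int))), Dom_compute_action_ranks sol →
    Pre_compute_action_ranks sol → Spec_compute_action_ranks sol (compute_action_ranks sol)

-- ===== LEMMAS AND PROOFS =====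

-- G1: the record-building loop is a filterMap
theorem pv_foldl_build {β : Type} (f : Int → Int → β) :
    ∀ (l : List (Int × Option Int)) (acc : List β),
    l.foldl (fun acc p => match p.2 with | none => acc | some q => acc ++ [f p.1 q]) acc
      = acc ++ l.filterMap (fun p => p.2.map (f p.1)) := by
  intro l
  induction l with
  | nil => simp
  | cons p t ih =>
    intro acc
    cases hp : p.2 with
    | none => simp [hp, ih]
    | some q => simp [hp, ih]

-- G2: membership in enumerate
theorem pv_mem_enumerate {α : Type} :
    ∀ (xs : List α) (s : Int) (p : Int × α),
    p ∈ PySem.List.enumerate xs s ↔ ∃ n : Nat, ∃ h : n < xs.length, p = (s + n, xs[n]) := by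
  intro xs
  induction xs with
  | nil => simp [PySem.List.enumerate]
  | cons x t ih =>
    intro s p
    rw [PySem.List.enumerate_cons]
    constructor
    · intro hmem
      rcases List.mem_cons.1 hmem with h | h
      · exact ⟨0, by simp, by simpa using h⟩
      · rcases (ih (s+1) p).1 h with ⟨n, hn, rfl⟩
        refine ⟨n+1, by simpa using hn, ?_⟩
        simp only [List.getElem_cons_succ]
        congr 1
        push_cast
        ring
    · rintro ⟨n, hn, rfl⟩
      cases n with
      | zero => simp
      | succ m =>
        have hm : m < t.length := by simpa using hn
        refine List.mem_cons.2 (Or.inr ((ih (s+1) _).2 ⟨m, hm, ?_⟩))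
        simp only [List.getElem_cons_succ]
        congr 1
        push_cast
        ring

-- G3: first components of the records are the legal indices
theorem pv_map_fst_filterMap {β : Type} (f : Int → Int → β) (g : β → Int)
    (hf : ∀ i q, g (f i q) = i) :
    ∀ (l : List (Int × Option Int)),
    (l.filterMap (fun p => p.2.map (f p.1))).map g = (l.filter (fun p => p.2.isSome)).map (fun p => p.1) := by
  intro l
  induction l with
  | nil => simp
  | cons p t ih =>
    cases hp : p.2 with
    | none => simp [hp, ih]
    | some q => simp [hp, ih, hf]

-- G4: insertBy only looks at the order on the elements present
theorem pv_insertBy_congr {α : Type} (S : α → Prop) (b1 b2 : α → α → Bool)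
    (h : ∀ a b, S a → S b → b1 a b = b2 a b) (x : α) (hx : S x) :
    ∀ (ys : List α), (∀ y ∈ ys, S y) → PySem.List.insertBy b1 x ys = PySem.List.insertBy b2 x ys := by
  intro ys
  induction ys with
  | nil => intro _; rfl
  | cons y t ih =>
    intro hys
    have hy : S y := hys y (by simp)
    show (if b1 x y then x :: y :: t else y :: PySem.List.insertBy b1 x t)
       = (if b2 x y then x :: y :: t else y :: PySem.List.insertBy b2 x t)
    rw [h x y hx hy, ih (fun z hz => hys z (by simp [hz]))]

-- G5: and so does the insertion-sort fold
theorem pv_foldl_insertBy_congr {α : Type} (S : α → Prop) (b1 b2 : α → α → Bool)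
    (h : ∀ a b, S a → S b → b1 a b = b2 a b) :
    ∀ (l : List α) (acc : List α), (∀ x ∈ l, S x) → (∀ x ∈ acc, S x) →
    l.foldl (fun acc x => PySem.List.insertBy b1 x acc) acc
      = l.foldl (fun acc x => PySem.List.insertBy b2 x acc) acc := by
  intro l
  induction l with
  | nil => intro _ _ _; rfl
  | cons x t ih =>
    intro acc hl hacc
    have hx : S x := hl x (by simp)
    simp only [List.foldl_cons]
    rw [pv_insertBy_congr S b1 b2 h x hx acc hacc]
    exact ih _ (fun z hz => hl z (by simp [hz]))
      (fun z hz => ((PySem.List.mem_insertBy b2 x z acc).1 hz).elim (fun e => e ▸ hx) (hacc z))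

-- G6: nodup count split at a member
theorem pv_countP_le_split (k : Int) :
    ∀ (S : List Int), S.Nodup → k ∈ S →
    S.countP (fun v => decide (v ≤ k)) = S.countP (fun v => decide (v < k)) + 1 := by
  intro S
  induction S with
  | nil => simp
  | cons a t ih =>
    intro hnd hk
    rcases List.mem_cons.1 hk with rfl | hk
    · have hv : k ∉ t := (List.nodup_cons.1 hnd).1
      have ht : t.countP (fun x => decide (x ≤ k)) = t.countP (fun x => decide (x < k)) := by
        refine List.countP_congr (fun x hx => ?_)
        have : x ≠ k := fun e => hv (e ▸ hx)
        simp only [decide_eq_true_eq]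
        omega
      simp [ht]
    · have ht := ih (List.nodup_cons.1 hnd).2 hk
      simp only [List.countP_cons, ht, decide_eq_true_eq]
      by_cases hle : a ≤ k
      · have hlt : a < k := lt_of_le_of_ne hle (fun e => (List.nodup_cons.1 hnd).1 (e ▸ hk))
        simp [hle, hlt]
      · have hnlt : ¬ a < k := fun h' => hle h'.le
        simp [hle, hnlt]

-- G7a: write-folds preserve length
theorem pv_writeFold_length {α : Type} (idx : α → Int) (c : α → Bool) (v : α → Option Int) :
    ∀ (l : List α) (arr : List (Option Int)),
    (l.foldl (fun a r => if c r then PySem.List.pySetD a (idx r) (v r) else a) arr).length = arr.length := by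
  intro l
  induction l with
  | nil => intro arr; rfl
  | cons r t ih =>
    intro arr
    simp only [List.foldl_cons]
    rw [ih]
    by_cases h : c r <;> simp [h, PySem.List.length_pySetD]

theorem pv_writeFold_noWrite {α : Type} (idx : α → Int) (c : α → Bool) (v : α → Option Int) :
    ∀ (l : List α) (arr : List (Option Int)) (j : Nat),
    (∀ r ∈ l, 0 ≤ idx r ∧ idx r < (arr.length : Int)) → (∀ r ∈ l, idx r ≠ (j : Int)) →
    PySem.List.pyGetD (l.foldl (fun a r => if c r then PySem.List.pySetD a (idx r) (v r) else a) arr) (j : Int) none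
      = PySem.List.pyGetD arr (j : Int) none := by
  intro l
  induction l with
  | nil => intro arr j _ _; rfl
  | cons r t ih =>
    intro arr j hb hj
    have hr := hb r (by simp)
    simp only [List.foldl_cons]
    by_cases hc : c r
    · simp only [hc, if_pos]
      set n : Nat := (idx r).toNat with hn
      have hidx : idx r = (n : Int) := by omega
      have hlen : n < arr.length := by omega
      rw [ih _ j (fun x hx => by
            have := hb x (by simp [hx])
            rw [PySem.List.length_pySetD]
            exact this)
          (fun x hx => hj x (by simp [hx]))]
      rw [hidx, PySem.List.pyGetD_pySetD_natCast _ _ _ _ _ hlen]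
      have : j ≠ n := by
        intro e
        exact hj r (by simp) (by rw [hidx, e])
      simp [this]
    · simp only [hc, if_neg, Bool.false_eq_true, not_false_iff]
      exact ih _ j (fun x hx => hb x (by simp [hx])) (fun x hx => hj x (by simp [hx]))

theorem pv_writeFold_find {α : Type} (idx : α → Int) (c : α → Bool) (v : α → Option Int) :
    ∀ (l : List α) (arr : List (Option Int)) (j : Nat),
    (l.map idx).Nodup → (∀ r ∈ l, 0 ≤ idx r ∧ idx r < (arr.length : Int)) → j < arr.length →
    PySem.List.pyGetD (l.foldl (fun a r => if c r then PySem.List.pySetD a (idx r) (v r) else a) arr) (j : Int) none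
      = (match l.find? (fun r => idx r == (j : Int)) with
         | some r => if c r then v r else PySem.List.pyGetD arr (j : Int) none
         | none => PySem.List.pyGetD arr (j : Int) none) := by
  intro l
  induction l with
  | nil => intro arr j _ _ _; rfl
  | cons r t ih =>
    intro arr j hnd hb hjl
    have hr := hb r (by simp)
    have hndt : (t.map idx).Nodup := (List.nodup_cons.1 (by simpa using hnd)).2
    have hrt : idx r ∉ t.map idx := (List.nodup_cons.1 (by simpa using hnd)).1
    simp only [List.foldl_cons, List.find?_cons]
    by_cases hij : idx r = (j : Int)
    · have : (idx r == (j : Int)) = true := by simp [hij]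
      rw [this]
      simp only []
      have hnw : ∀ x ∈ t, idx x ≠ (j : Int) := by
        intro x hx e
        have hxe : idx r = idx x := by rw [hij, ← e]
        exact hrt (hxe ▸ List.mem_map_of_mem hx)
      by_cases hc : c r
      · simp only [hc, if_pos]
        rw [pv_writeFold_noWrite idx c v t _ j (fun x hx => by
              have := hb x (by simp [hx]); rw [PySem.List.length_pySetD]; exact this) hnw]
        rw [hij]
        rw [PySem.List.pyGetD_pySetD_natCast _ _ _ _ _ (by omega : j < arr.length)]
        simp
      · simp only [hc, if_neg, Bool.false_eq_true, not_false_iff]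
        exact pv_writeFold_noWrite idx c v t arr j (fun x hx => hb x (by simp [hx])) hnw
    · have : (idx r == (j : Int)) = false := by simp [hij]
      rw [this]
      simp only []
      by_cases hc : c r
      · simp only [hc, if_pos]
        rw [ih _ j hndt (fun x hx => by
              have := hb x (by simp [hx]); rw [PySem.List.length_pySetD]; exact this)
            (by rw [PySem.List.length_pySetD]; exact hjl)]
        have hn : idx r = ((idx r).toNat : Int) := by omega
        rw [hn, PySem.List.pyGetD_pySetD_natCast _ _ _ _ _ (by omega : (idx r).toNat < arr.length)]
        have : j ≠ (idx r).toNat := by omega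
        simp [this]
      · simp only [hc, if_neg, Bool.false_eq_true, not_false_iff]
        exact ih _ j hndt (fun x hx => hb x (by simp [hx])) hjl

theorem pv_sorted2_eq_sorted {α : Type} (xs : List α) (k1 k2 : α → Int)
    (hb : ∀ x ∈ xs, -(2^31) ≤ k2 x ∧ k2 x ≤ 2^31) :
    PySem.List.sorted2 xs k1 k2 = PySem.List.sorted xs (fun x => k1 x * 2^40 + k2 x) := by
  show xs.foldl (fun acc x => PySem.List.insertBy
      (fun a b => decide (k1 a < k1 b) || !decide (k1 b < k1 a) && decide (k2 a < k2 b)) x acc) []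
    = xs.foldl (fun acc x => PySem.List.insertBy
      (fun a b => decide ((k1 a * 2^40 + k2 a) < (k1 b * 2^40 + k2 b))) x acc) []
  refine pv_foldl_insertBy_congr (fun x => -(2^31) ≤ k2 x ∧ k2 x ≤ 2^31) _ _ ?_ xs [] hb (by simp)
  intro a b ha hbb
  have hd : (decide (k1 a < k1 b) || !decide (k1 b < k1 a) && decide (k2 a < k2 b))
      = decide ((k1 a < k1 b) ∨ (k1 a ≤ k1 b ∧ k2 a < k2 b)) := by
    by_cases h : k1 b < k1 a
    · simp [h, not_le.2 h]
    · simp [h, not_lt.1 h]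
  rw [hd, decide_eq_decide]
  obtain ⟨ha1, ha2⟩ := ha
  obtain ⟨hb1, hb2⟩ := hbb
  have e1 : ((2:Int)^31) = 2147483648 := by norm_num
  have e2 : ((2:Int)^40) = 1099511627776 := by norm_num
  rw [e1] at ha1 ha2 hb1 hb2
  rw [e2]
  omega


-- encoded key: pvEnc (pvKeyA qs ds i) is B's packed key
def pvEnc (p : Int × Int) : Int := p.1 * 2 ^ 40 + p.2
def pvKeyE (qs ds : List (Option Int)) (i : Int) : Int := pvEnc (pvKeyA qs ds i)

theorem pv_enc_inj {p q : Int × Int}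
    (hp : -(2^31) ≤ p.2 ∧ p.2 ≤ 2^31) (hq : -(2^31) ≤ q.2 ∧ q.2 ≤ 2^31)
    (h : pvEnc p = pvEnc q) : p = q := by
  unfold pvEnc at h
  have e1 : ((2:Int)^31) = 2147483648 := by norm_num
  have e2 : ((2:Int)^40) = 1099511627776 := by norm_num
  rw [e1] at hp hq
  rw [e2] at h
  have h1 : p.1 = q.1 := by omega
  have h2 : p.2 = q.2 := by omega
  exact Prod.ext h1 h2


-- the records B builds, as a filterMap
def pvRecs (qs ds : List (Option Int)) : List (Int × Int × Option Int × Int) :=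
  (PySem.List.enumerate qs 0).filterMap (fun p => p.2.map (fun q => pvRecB ds p.1 q))

def pvDval : Option Int → Int
  | none => 1000000000
  | some x => x

theorem pv_moves_eq_recs (qs ds : List (Option Int)) :
    (PySem.List.enumerate qs 0).foldl (fun acc p =>
      match p.2 with
      | none => acc
      | some q => acc ++ [pvRecB ds p.1 q]) []
    = pvRecs qs ds := by
  rw [pv_foldl_build (pvRecB ds) (PySem.List.enumerate qs 0) []]
  rfl

theorem pv_recs_fst (qs ds : List (Option Int)) :
    (pvRecs qs ds).map (fun r => r.1)
      = ((PySem.List.enumerate qs 0).filter (fun p => p.2.isSome)).map (fun p => p.1) := by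
  exact pv_map_fst_filterMap (pvRecB ds) (fun r => r.1) (fun i q => rfl) _

theorem pv_mem_recs (qs ds : List (Option Int)) (r : Int × Int × Option Int × Int)
    (hr : r ∈ pvRecs qs ds) :
    ∃ n : Nat, ∃ hn : n < qs.length, qs[n] = some r.2.1 ∧ r = pvRecB ds (n : Int) r.2.1 := by
  rcases List.mem_filterMap.1 hr with ⟨p, hp, hpr⟩
  rcases (pv_mem_enumerate qs 0 p).1 hp with ⟨n, hn, rfl⟩
  simp only [zero_add] at hpr
  cases hq : qs[n] with
  | none => rw [hq] at hpr; simp at hpr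
  | some q =>
    rw [hq] at hpr
    simp only [Option.map_some, Option.some_inj] at hpr
    have h1 : r.2.1 = q := by rw [← hpr]; rfl
    refine ⟨n, hn, ?_, ?_⟩
    · rw [hq, h1]
    · rw [h1]
      exact hpr.symm

-- everything the proofs need to know about one record, under Pre_ (hP) and the domain bound (hB)
theorem pv_recFacts (qs ds : List (Option Int))
    (hP : ∀ n : Nat, ∀ hn : n < qs.length, qs[n] ≠ none →
      (qs[n] = some (-1) ∨ qs[n] = some 0 ∨ qs[n] = some 1) ∧ n < ds.length ∧ n < 9)
    (hB : ∀ x ∈ ds, ∀ d : Int, x = some d → -(2^31) ≤ d ∧ d ≤ 2^31)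
    (r : Int × Int × Option Int × Int) (hr : r ∈ pvRecs qs ds) :
    (PySem.List.pyGet? qs r.1).getD none = some r.2.1 ∧
    (r.2.1 = -1 ∨ r.2.1 = 0 ∨ r.2.1 = 1) ∧
    (PySem.List.pyGet? ds r.1).getD none = r.2.2.1 ∧
    pvKeyA qs ds r.1 = (-(pvOrd r.2.1), if r.2.1 = -1 then -(pvDval r.2.2.1) else pvDval r.2.2.1) ∧
    r.2.2.2 = pvKeyE qs ds r.1 ∧
    (-(2^31) ≤ (pvKeyA qs ds r.1).2 ∧ (pvKeyA qs ds r.1).2 ≤ 2^31) ∧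
    (0 ≤ r.1 ∧ r.1 < 9) := by
  rcases pv_mem_recs qs ds r hr with ⟨n, hn, hq, hrec⟩
  rcases hP n hn (by rw [hq]; simp) with ⟨hq3, hdn, h9⟩
  have hr1 : r.1 = (n : Int) := by rw [hrec]; rfl
  have hgq : PySem.List.pyGet? qs r.1 = some qs[n] := by
    rw [hr1]; exact PySem.List.pyGet?_ofNat qs n hn
  have hgd : PySem.List.pyGet? ds r.1 = some ds[n] := by
    rw [hr1]; exact PySem.List.pyGet?_ofNat ds n hdn
  have hd : (PySem.List.pyGet? ds r.1).getD none = ds[n] := by rw [hgd]; rfl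
  have hdrec : r.2.2.1 = ds[n] := by
    conv_lhs => rw [hrec]
    simp only [pvRecB]
    rw [← hr1, hd]
  have hkey : pvKeyA qs ds r.1
      = (-(pvOrd r.2.1), if r.2.1 = -1 then -(pvDval r.2.2.1) else pvDval r.2.2.1) := by
    unfold pvKeyA
    rw [hgq, hq]
    simp only [Option.getD_some]
    rw [hd, hdrec]
    cases hds : ds[n] <;> simp [pvDval]
  have hdvb : -(2^31) ≤ pvDval r.2.2.1 ∧ pvDval r.2.2.1 ≤ 2^31 := by
    rw [hdrec]
    cases hds : ds[n] with
    | none => norm_num [pvDval]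
    | some x =>
      have := hB ds[n] (List.getElem_mem hdn) x hds
      simpa [pvDval] using this
  refine ⟨by rw [hgq, hq]; rfl, by rw [hq] at hq3; simpa using hq3, by rw [hd, hdrec], hkey, ?_, ?_, ?_⟩
  · -- r.2.2.2 = pvKeyE
    conv_lhs => rw [hrec]
    simp only [pvRecB, pvKeyE, pvEnc, hkey]
    rw [← hr1, hd, hdrec]
    rfl
  · rw [hkey]
    by_cases h : r.2.1 = -1 <;> simp [h] <;> omega
  · rw [hr1]
    constructor
    · exact Int.natCast_nonneg n
    · exact_mod_cast h9

-- the pure (stateless-rank) form of A's loop body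
def pvStepP (qs ds : List (Option Int)) (S : List Int) (bq : Int) (pref : Option Int)
    (st : List (Option Int) × List (Option Int) × List (Option Int)) (i : Int) :
    List (Option Int) × List (Option Int) × List (Option Int) :=
  let rk := PySem.List.pySetD st.1 i (some (1 + (S.countP (fun v => decide (v < pvKeyE qs ds i)) : Int)))
  let q : Int := ((PySem.List.pyGet? qs i).getD none).getD 0
  let vr := PySem.List.pySetD st.2.1 i (some (pvOrd bq - pvOrd q))
  let d := (PySem.List.pyGet? ds i).getD none
  let dr := if (PySem.List.pyGet? qs i).getD none = some bq ∧ d ≠ none ∧ pref ≠ none then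
      PySem.List.pySetD st.2.2 i
        (some (if bq = -1 then max 0 (pref.getD 0 - d.getD 0) else max 0 (d.getD 0 - pref.getD 0)))
    else st.2.2
  (rk, vr, dr)

theorem pv_walkA (qs ds : List (Option Int)) (S : List Int) (bq : Int) (pref : Option Int)
    (hS : S.Nodup) :
    ∀ (l : List Int) (p₀ : Int × Int) (cur : Int)
      (arrs : List (Option Int) × List (Option Int) × List (Option Int)),
    l.Pairwise (fun a b => pvKeyE qs ds a ≤ pvKeyE qs ds b) →
    (∀ i ∈ l, pvEnc p₀ ≤ pvKeyE qs ds i) →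
    (∀ i ∈ l, pvKeyE qs ds i ∈ S) →
    (∀ i ∈ l, -(2^31) ≤ (pvKeyA qs ds i).2 ∧ (pvKeyA qs ds i).2 ≤ 2^31) →
    (-(2^31) ≤ p₀.2 ∧ p₀.2 ≤ 2^31) →
    (∀ v ∈ S, v ≤ pvEnc p₀ ∨ v ∈ l.map (pvKeyE qs ds)) →
    pvEnc p₀ ∈ S →
    cur = (S.countP (fun v => decide (v ≤ pvEnc p₀)) : Int) →
    (l.foldl (pvStepA qs ds bq pref) (some p₀, cur, arrs)).2.2
      = l.foldl (pvStepP qs ds S bq pref) arrs := by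
  intro l
  induction l with
  | nil => intro p₀ cur arrs _ _ _ _ _ _ _ _; rfl
  | cons i t ih =>
    intro p₀ cur arrs hpw hle hmem hbnd hp₀ hres hp₀S hcur
    have hbi := hbnd i (by simp)
    have hkeS : pvKeyE qs ds i ∈ S := hmem i (by simp)
    have hpw' := List.pairwise_cons.1 hpw
    simp only [List.foldl_cons]
    by_cases hk : pvKeyA qs ds i = p₀
    · -- same key as previous: rank unchanged
      have hke : pvKeyE qs ds i = pvEnc p₀ := by rw [pvKeyE, hk]
      have hcount : cur = 1 + (S.countP (fun v => decide (v < pvKeyE qs ds i)) : Int) := by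
        rw [hcur, hke, pv_countP_le_split (pvEnc p₀) S hS hp₀S]
        push_cast
        ring
      have hstep : pvStepA qs ds bq pref (some p₀, cur, arrs) i
          = (some p₀, cur, pvStepP qs ds S bq pref arrs i) := by
        simp only [pvStepA, pvStepP, hk]
        simp [← hcount]
      rw [hstep]
      exact ih p₀ cur _ hpw'.2 (fun j hj => hle j (by simp [hj]))
        (fun j hj => hmem j (by simp [hj])) (fun j hj => hbnd j (by simp [hj])) hp₀
        (fun v hv => (hres v hv).elim Or.inl (fun hm => by
          rcases List.mem_map.1 hm with ⟨j, hj, rfl⟩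
          rcases List.mem_cons.1 hj with rfl | hj
          · exact Or.inl (le_of_eq hke)
          · exact Or.inr (List.mem_map_of_mem hj)))
        hp₀S hcur
    · -- strictly larger key: rank increments
      have hlt : pvEnc p₀ < pvKeyE qs ds i := by
        rcases lt_or_eq_of_le (hle i (by simp)) with h | h
        · exact h
        · exact absurd (pv_enc_inj hbi hp₀ h.symm) hk
      have hcount : cur + 1 = 1 + (S.countP (fun v => decide (v < pvKeyE qs ds i)) : Int) := by
        rw [hcur]
        have : S.countP (fun v => decide (v ≤ pvEnc p₀)) = S.countP (fun v => decide (v < pvKeyE qs ds i)) := by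
          refine List.countP_congr (fun v hv => ?_)
          simp only [decide_eq_true_eq]
          constructor
          · intro h; exact lt_of_le_of_lt h hlt
          · intro h
            rcases hres v hv with h' | h'
            · exact h'
            · exfalso
              rcases List.mem_map.1 h' with ⟨j, hj, rfl⟩
              rcases List.mem_cons.1 hj with rfl | hj
              · exact lt_irrefl _ h
              · exact absurd (lt_of_lt_of_le h (hpw'.1 j hj)) (lt_irrefl _)
        rw [this]
        ring
      have hstep : pvStepA qs ds bq pref (some p₀, cur, arrs) i
          = (some (pvKeyA qs ds i), cur + 1, pvStepP qs ds S bq pref arrs i) := by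
        simp only [pvStepA, pvStepP]
        have hne : (some (pvKeyA qs ds i) ≠ some p₀) := by simpa using hk
        simp [hne, ← hcount]
      rw [hstep]
      have hkeS' : cur + 1 = (S.countP (fun v => decide (v ≤ pvKeyE qs ds i)) : Int) := by
        rw [pv_countP_le_split (pvKeyE qs ds i) S hS hkeS]
        push_cast at hcount ⊢
        omega
      exact ih (pvKeyA qs ds i) (cur + 1) _ hpw'.2
        (fun j hj => hpw'.1 j hj)
        (fun j hj => hmem j (by simp [hj])) (fun j hj => hbnd j (by simp [hj])) hbi
        (fun v hv => (hres v hv).elim (fun h => Or.inl (le_of_lt (lt_of_le_of_lt h hlt))) (fun hm => by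
          rcases List.mem_map.1 hm with ⟨j, hj, rfl⟩
          rcases List.mem_cons.1 hj with rfl | hj
          · exact Or.inl (le_refl _)
          · exact Or.inr (List.mem_map_of_mem hj)))
        hkeS hkeS'



theorem pv_legal_nodup (qs : List (Option Int)) :
    (((PySem.List.enumerate qs 0).filter (fun p => p.2.isSome)).map (fun p => p.1)).Nodup := by
  have h1 : ((PySem.List.enumerate qs 0).map (fun p => p.1)).Nodup := by
    rw [PySem.List.map_fst_enumerate]
    exact PySem.List.nodup_pyRange_one 0 (0 + (qs.length : Int))
  have h2 : (((PySem.List.enumerate qs 0).filter (fun p => p.2.isSome)).map (fun p => p.1)).Sublist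
      ((PySem.List.enumerate qs 0).map (fun p => p.1)) :=
    List.Sublist.map _ List.filter_sublist
  exact List.Nodup.sublist h2 h1

-- named stages of the two port bodies (definitional: see pvA_def / pvB_def)
def pvLegal (qs : List (Option Int)) : List Int :=
  ((PySem.List.enumerate qs 0).filter (fun p => p.2.isSome)).map (fun p => p.1)
def pvSm (qs ds : List (Option Int)) : List Int :=
  PySem.List.sorted2 (pvLegal qs) (fun i => (pvKeyA qs ds i).1) (fun i => (pvKeyA qs ds i).2)
def pvR0 : List (Option Int) := List.replicate 9 none
def pvBqAOf (qs : List (Option Int)) (sm : List Int) : Int :=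
  ((PySem.List.pyGet? qs (sm.headD 0)).getD none).getD 0
def pvBestDsAOf (qs ds : List (Option Int)) (bq : Int) : List Int :=
  (pvLegal qs).filterMap (fun i =>
    if (PySem.List.pyGet? qs i).getD none = some bq then (PySem.List.pyGet? ds i).getD none else none)
def pvPrefOf (bestDs : List Int) (bq : Int) : Option Int :=
  if bestDs = [] then none
  else some (if bq = -1 then (PySem.List.max? bestDs (fun d => d)).getD 0
             else (PySem.List.min? bestDs (fun d => d)).getD 0)
def pvOutA' (qs ds : List (Option Int)) (sm : List Int) :
    List (Option Int) × List (Option Int) × List (Option Int) :=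
  if sm = [] then (pvR0, pvR0, pvR0) else
  let bq := pvBqAOf qs sm
  let st := sm.foldl (pvStepA qs ds bq (pvPrefOf (pvBestDsAOf qs ds bq) bq)) (none, 0, pvR0, pvR0, pvR0)
  (st.2.2.1, st.2.2.2.1, st.2.2.2.2)

def pvMoves (qs ds : List (Option Int)) : List (Int × Int × Option Int × Int) :=
  (PySem.List.enumerate qs 0).foldl (fun acc p =>
      match p.2 with
      | none => acc
      | some q => acc ++ [pvRecB ds p.1 q]) []
def pvBqBOf (ms : List (Int × Int × Option Int × Int)) : Int :=
  (PySem.List.max? (ms.map (fun m => m.2.1)) pvOrd).getD 0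
def pvBestDsBOf (ms : List (Int × Int × Option Int × Int)) (bq : Int) : List Int :=
  ms.filterMap (fun m => if m.2.1 = bq then m.2.2.1 else none)
def pvOutB' (ms : List (Int × Int × Option Int × Int)) :
    List (Option Int) × List (Option Int) × List (Option Int) :=
  if ms = [] then (pvR0, pvR0, pvR0) else
  let keys := PySem.Set.ofList (ms.map (fun m => m.2.2.2))
  let bq := pvBqBOf ms
  ms.foldl (pvStepB keys bq (pvPrefOf (pvBestDsBOf ms bq) bq)) (pvR0, pvR0, pvR0)

theorem pvA_def (sol : List (String × List (Option Int))) :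
    compute_action_ranks sol = pvOutA' (pvQs sol) (pvDs sol) (pvSm (pvQs sol) (pvDs sol)) := rfl
theorem pvB_def (sol : List (String × List (Option Int))) :
    compute_action_ranks_alt sol = pvOutB' (pvMoves (pvQs sol) (pvDs sol)) := rfl

-- the per-component comparison of the two write-folds
theorem pv_comp_eq {β : Type} (sm : List Int) (recs : List β) (idxB : β → Int)
    (cA : Int → Bool) (vA : Int → Option Int) (cB : β → Bool) (vB : β → Option Int)
    (hperm : sm.Perm (recs.map idxB))
    (hnd : (recs.map idxB).Nodup)
    (hrange : ∀ i ∈ recs.map idxB, 0 ≤ i ∧ i < 9)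
    (hc : ∀ r ∈ recs, cA (idxB r) = cB r)
    (hv : ∀ r ∈ recs, vA (idxB r) = vB r) :
    sm.foldl (fun a i => if cA i then PySem.List.pySetD a i (vA i) else a) (List.replicate 9 none)
      = recs.foldl (fun a r => if cB r then PySem.List.pySetD a (idxB r) (vB r) else a) (List.replicate 9 none) := by
  have hndS : sm.Nodup := (hperm.nodup_iff).2 hnd
  have hrangeS : ∀ i ∈ sm, 0 ≤ i ∧ i < 9 := fun i hi => hrange i (hperm.mem_iff.1 hi)
  have hlenA := pv_writeFold_length (fun i => i) cA vA sm (List.replicate 9 none)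
  have hlenB := pv_writeFold_length idxB cB vB recs (List.replicate 9 none)
  apply List.ext_getElem (by rw [hlenA, hlenB])
  intro j hj1 hj2
  have hj9 : j < 9 := by rw [hlenA] at hj1; simpa using hj1
  have hbrA : PySem.List.pyGetD
      (sm.foldl (fun a i => if cA i then PySem.List.pySetD a i (vA i) else a) (List.replicate 9 none)) (j : Int) none
      = _ := pv_writeFold_find (fun i => i) cA vA sm (List.replicate 9 none) j
        (by simpa using hndS)
        (fun i hi => by have := hrangeS i hi; simp; omega) (by simpa using hj9)
  have hbrB := pv_writeFold_find idxB cB vB recs (List.replicate 9 none) j hnd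
        (fun r hr => by have := hrange (idxB r) (List.mem_map_of_mem hr); simp; omega)
        (by simpa using hj9)
  have hgA : (sm.foldl (fun a i => if cA i then PySem.List.pySetD a i (vA i) else a) (List.replicate 9 none))[j]'hj1
      = PySem.List.pyGetD (sm.foldl (fun a i => if cA i then PySem.List.pySetD a i (vA i) else a) (List.replicate 9 none)) (j : Int) none := by
    rw [PySem.List.pyGetD_eq_getElem _ _ (by positivity) (by exact_mod_cast hj1)]
    simp
  have hgB : (recs.foldl (fun a r => if cB r then PySem.List.pySetD a (idxB r) (vB r) else a) (List.replicate 9 none))[j]'hj2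
      = PySem.List.pyGetD (recs.foldl (fun a r => if cB r then PySem.List.pySetD a (idxB r) (vB r) else a) (List.replicate 9 none)) (j : Int) none := by
    rw [PySem.List.pyGetD_eq_getElem _ _ (by positivity) (by exact_mod_cast hj2)]
    simp
  rw [hgA, hgB, hbrA, hbrB]
  by_cases hmem : ((j : Int)) ∈ recs.map idxB
  · -- both find? succeed at the unique record for j
    have hsmmem : ((j : Int)) ∈ sm := hperm.mem_iff.2 hmem
    obtain ⟨iA, hfA⟩ : ∃ x, sm.find? (fun i => i == (j : Int)) = some x := by
      have h := List.find?_isSome (p := fun i => i == (j : Int)).2 ⟨(j : Int), hsmmem, by simp⟩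
      exact Option.isSome_iff_exists.1 h
    have hiA : iA = (j : Int) := by simpa using List.find?_some hfA
    obtain ⟨rB, hfB⟩ : ∃ x, recs.find? (fun r => idxB r == (j : Int)) = some x := by
      rcases List.mem_map.1 hmem with ⟨r, hr, hri⟩
      have h := List.find?_isSome (p := fun r => idxB r == (j : Int)).2 ⟨r, hr, by rw [hri]; simp⟩
      exact Option.isSome_iff_exists.1 h
    have hrBmem : rB ∈ recs := List.mem_of_find?_eq_some hfB
    have hrBi : idxB rB = (j : Int) := by simpa using List.find?_some hfB
    rw [hfA, hfB]
    simp only [hiA]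
    rw [← hrBi, hc rB hrBmem, hv rB hrBmem]
  · have hfA : sm.find? (fun i => i == (j : Int)) = none := by
      refine List.find?_eq_none.2 (fun x hx => ?_)
      intro hbeq
      exact hmem (by rw [← show x = (j : Int) from by simpa using hbeq]; exact hperm.mem_iff.1 hx)
    have hfB : recs.find? (fun r => idxB r == (j : Int)) = none := by
      refine List.find?_eq_none.2 (fun r hr => ?_)
      intro hbeq
      exact hmem (by rw [← show idxB r = (j : Int) from by simpa using hbeq]; exact List.mem_map_of_mem hr)
    rw [hfA, hfB]


theorem pv_ord_inj (a b : Int) (ha : a = -1 ∨ a = 0 ∨ a = 1) (hb : b = -1 ∨ b = 0 ∨ b = 1)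
    (h1 : pvOrd a ≤ pvOrd b) (h2 : pvOrd b ≤ pvOrd a) : a = b := by
  rcases ha with rfl | rfl | rfl <;> rcases hb with rfl | rfl | rfl <;>
    first | rfl | (exfalso; revert h1 h2; decide)

theorem pv_foldl_triple {α : Type} (f1 f2 f3 : List (Option Int) → α → List (Option Int)) :
    ∀ (l : List α) (a b c : List (Option Int)),
    l.foldl (fun st x => (f1 st.1 x, f2 st.2.1 x, f3 st.2.2 x)) (a, b, c)
      = (l.foldl f1 a, l.foldl f2 b, l.foldl f3 c) := by
  intro l
  induction l with
  | nil => intro a b c; rfl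
  | cons x t ih => intro a b c; simp only [List.foldl_cons]; exact ih _ _ _

theorem pv_out_eq (qs ds : List (Option Int))
    (hP : ∀ n : Nat, ∀ hn : n < qs.length, qs[n] ≠ none →
      (qs[n] = some (-1) ∨ qs[n] = some 0 ∨ qs[n] = some 1) ∧ n < ds.length ∧ n < 9)
    (hB : ∀ x ∈ ds, ∀ d : Int, x = some d → -(2^31) ≤ d ∧ d ≤ 2^31) :
    pvOutA' qs ds (pvSm qs ds) = pvOutB' (pvRecs qs ds) := by
  have hfacts := pv_recFacts qs ds hP hB
  have hfst : (pvRecs qs ds).map (fun r => r.1) = pvLegal qs := pv_recs_fst qs ds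
  have hndL : (pvLegal qs).Nodup := pv_legal_nodup qs
  have hboundL : ∀ i ∈ pvLegal qs, -(2^31) ≤ (pvKeyA qs ds i).2 ∧ (pvKeyA qs ds i).2 ≤ 2^31 := by
    intro i hi
    rw [← hfst] at hi
    rcases List.mem_map.1 hi with ⟨r, hr, rfl⟩
    exact (hfacts r hr).2.2.2.2.2.1
  have hrangeL : ∀ i ∈ pvLegal qs, 0 ≤ i ∧ i < 9 := by
    intro i hi
    rw [← hfst] at hi
    rcases List.mem_map.1 hi with ⟨r, hr, rfl⟩
    exact (hfacts r hr).2.2.2.2.2.2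
  have hsm : pvSm qs ds = PySem.List.sorted (pvLegal qs) (pvKeyE qs ds) := by
    unfold pvSm
    rw [pv_sorted2_eq_sorted (pvLegal qs) _ _ hboundL]
    rfl
  by_cases hnil : pvLegal qs = []
  · have hrecs0 : pvRecs qs ds = [] := by
      have h : (pvRecs qs ds).map (fun r => r.1) = [] := by rw [hfst, hnil]
      exact List.map_eq_nil_iff.1 h
    rw [hsm, hnil, hrecs0]
    rfl
  · have hrecs_ne : pvRecs qs ds ≠ [] := by
      intro h
      rw [← hfst, h] at hnil
      exact hnil rfl
    -- B's distinct-key set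
    set S : List Int := PySem.Set.ofList ((pvRecs qs ds).map (fun m => m.2.2.2)) with hSdef
    have hSnd : S.Nodup := PySem.Set.nodup_ofList _
    have hkeymap : ∀ r ∈ pvRecs qs ds, r.2.2.2 = pvKeyE qs ds r.1 := fun r hr => (hfacts r hr).2.2.2.2.1
    have hSkey : ∀ i ∈ pvLegal qs, pvKeyE qs ds i ∈ S := by
      intro i hi
      rw [← hfst] at hi
      rcases List.mem_map.1 hi with ⟨r, hr, rfl⟩
      rw [hSdef, PySem.Set.mem_ofList, ← hkeymap r hr]
      exact List.mem_map_of_mem hr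
    have hSrev : ∀ v ∈ S, v ∈ (pvLegal qs).map (pvKeyE qs ds) := by
      intro v hv
      rw [hSdef, PySem.Set.mem_ofList] at hv
      rcases List.mem_map.1 hv with ⟨r, hr, rfl⟩
      have hr1L : r.1 ∈ pvLegal qs := by
        rw [← hfst]
        exact List.mem_map_of_mem hr
      rw [hkeymap r hr]
      exact List.mem_map_of_mem hr1L
    -- the sorted list is nonempty
    obtain ⟨i1, rest, hcons⟩ : ∃ a l, PySem.List.sorted (pvLegal qs) (pvKeyE qs ds) = a :: l := by
      cases h : PySem.List.sorted (pvLegal qs) (pvKeyE qs ds) with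
      | nil => exact absurd ((PySem.List.sorted_eq_nil_iff _ _ _).1 h) hnil
      | cons a l => exact ⟨a, l, rfl⟩
    have hperm : (PySem.List.sorted (pvLegal qs) (pvKeyE qs ds)).Perm (pvLegal qs) :=
      PySem.List.sorted_perm _ _ _
    have hpw : (PySem.List.sorted (pvLegal qs) (pvKeyE qs ds)).Pairwise
        (fun a b => pvKeyE qs ds a ≤ pvKeyE qs ds b) := PySem.List.sorted_pairwise _ _
    have hheadmin : ∀ y ∈ pvLegal qs, pvKeyE qs ds i1 ≤ pvKeyE qs ds y :=
      PySem.List.key_head_sorted_le _ _ hcons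
    have hi1L : i1 ∈ pvLegal qs := hperm.mem_iff.1 (by rw [hcons]; simp)
    obtain ⟨r1, hr1, hr1i⟩ : ∃ r ∈ pvRecs qs ds, r.1 = i1 := by
      have h := hi1L
      rw [← hfst] at h
      rcases List.mem_map.1 h with ⟨r, hr, hh⟩
      exact ⟨r, hr, hh⟩
    -- best_q agreement
    have hbqA : pvBqAOf qs (pvSm qs ds) = r1.2.1 := by
      rw [hsm, hcons]
      unfold pvBqAOf
      simp only [List.headD_cons]
      rw [← hr1i, (hfacts r1 hr1).1]
      rfl
    obtain ⟨qm, hqm⟩ : ∃ x, PySem.List.max? ((pvRecs qs ds).map (fun m => m.2.1)) pvOrd = some x := by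
      cases h : PySem.List.max? ((pvRecs qs ds).map (fun m => m.2.1)) pvOrd with
      | none =>
        rw [PySem.List.max?_eq_none_iff] at h
        exact absurd (List.map_eq_nil_iff.1 h) hrecs_ne
      | some x => exact ⟨x, rfl⟩
    obtain ⟨r2, hr2, hr2q⟩ : ∃ r ∈ pvRecs qs ds, r.2.1 = qm := by
      rcases List.mem_map.1 (PySem.List.max?_mem hqm) with ⟨r, hr, hh⟩
      exact ⟨r, hr, hh⟩
    have hordmax : pvOrd r1.2.1 ≤ pvOrd qm :=
      PySem.List.max?_isMax hqm r1.2.1 (List.mem_map_of_mem hr1)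
    have hordle : pvOrd qm ≤ pvOrd r1.2.1 := by
      have hkle : pvKeyE qs ds i1 ≤ pvKeyE qs ds r2.1 :=
        hheadmin r2.1 (by rw [← hfst]; exact List.mem_map_of_mem hr2)
      have hk1 := (hfacts r1 hr1).2.2.2.1
      have hk2 := (hfacts r2 hr2).2.2.2.1
      have hb1 := (hfacts r1 hr1).2.2.2.2.2.1
      have hb2 := (hfacts r2 hr2).2.2.2.2.2.1
      rw [← hr1i] at hkle
      unfold pvKeyE pvEnc at hkle
      have f1 : (pvKeyA qs ds r1.1).1 = -(pvOrd r1.2.1) := by rw [hk1]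
      have f2 : (pvKeyA qs ds r2.1).1 = -(pvOrd r2.2.1) := by rw [hk2]
      rw [f1, f2] at hkle
      have e2 : ((2:Int)^40) = 1099511627776 := by norm_num
      have e1 : ((2:Int)^31) = 2147483648 := by norm_num
      rw [e2] at hkle
      rw [e1] at hb1 hb2
      rw [← hr2q]
      omega
    have hbqB : pvBqBOf (pvRecs qs ds) = qm := by unfold pvBqBOf; rw [hqm]; rfl
    have hbq : pvBqAOf qs (pvSm qs ds) = pvBqBOf (pvRecs qs ds) := by
      rw [hbqA, hbqB, ← hr2q]
      rw [← hr2q] at hordmax hordle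
      exact pv_ord_inj _ _ (hfacts r1 hr1).2.1 (hfacts r2 hr2).2.1 hordmax hordle
    -- best-dtt candidate lists agree
    have hbds : ∀ bq, pvBestDsAOf qs ds bq = pvBestDsBOf (pvRecs qs ds) bq := by
      intro bq
      unfold pvBestDsAOf pvBestDsBOf
      rw [← hfst, List.filterMap_map]
      refine List.filterMap_congr (fun r hr => ?_)
      have hq := (hfacts r hr).1
      have hd := (hfacts r hr).2.2.1
      simp only [Function.comp]
      rw [hq, hd]
      by_cases h : r.2.1 = bq
      · simp [h]
      · simp [h]
    -- the two final loops compute the same arrays (for ANY best-q and pref)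
    have hcompare : ∀ (bq : Int) (pref : Option Int),
        (i1 :: rest).foldl (pvStepP qs ds S bq pref) (pvR0, pvR0, pvR0)
          = (pvRecs qs ds).foldl (pvStepB S bq pref) (pvR0, pvR0, pvR0) := by
      intro bq pref
      have hpermC : (i1 :: rest).Perm ((pvRecs qs ds).map (fun r => r.1)) := by
        rw [hfst, ← hcons]
        exact hperm
      have hndC : (((pvRecs qs ds)).map (fun r => r.1)).Nodup := by
        rw [hfst]; exact hndL
      have hrangeC : ∀ i ∈ (pvRecs qs ds).map (fun r => r.1), 0 ≤ i ∧ i < 9 := by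
        rw [hfst]; exact hrangeL
      have hstepPfun : pvStepP qs ds S bq pref = (fun st i =>
          ((fun (a : List (Option Int)) (i : Int) => if (fun (_ : Int) => true) i then PySem.List.pySetD a i ((fun (i : Int) => some (1 + (S.countP (fun v => decide (v < pvKeyE qs ds i)) : Int))) i) else a) st.1 i,
           (fun (a : List (Option Int)) (i : Int) => if (fun (_ : Int) => true) i then PySem.List.pySetD a i ((fun (i : Int) => some (pvOrd bq - pvOrd (((PySem.List.pyGet? qs i).getD none).getD 0))) i) else a) st.2.1 i,
           (fun (a : List (Option Int)) (i : Int) => if (fun (i : Int) => decide ((PySem.List.pyGet? qs i).getD none = some bq ∧ (PySem.List.pyGet? ds i).getD none ≠ none ∧ pref ≠ none)) i then PySem.List.pySetD a i ((fun (i : Int) => some (if bq = -1 then max 0 (pref.getD 0 - ((PySem.List.pyGet? ds i).getD none).getD 0) else max 0 (((PySem.List.pyGet? ds i).getD none).getD 0 - pref.getD 0))) i) else a) st.2.2 i)) := by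
        funext st i
        simp only [pvStepP]
        by_cases h : (PySem.List.pyGet? qs i).getD none = some bq ∧ (PySem.List.pyGet? ds i).getD none ≠ none ∧ pref ≠ none
        · simp [h]
        · simp [h]
      have hstepBfun : pvStepB S bq pref = (fun st m =>
          ((fun (a : List (Option Int)) (m : Int × Int × Option Int × Int) => if (fun (_ : Int × Int × Option Int × Int) => true) m then PySem.List.pySetD a ((fun (m : Int × Int × Option Int × Int) => m.1) m) ((fun (m : Int × Int × Option Int × Int) => some (1 + (S.countP (fun k2 => decide (k2 < m.2.2.2)) : Int))) m) else a) st.1 m,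
           (fun (a : List (Option Int)) (m : Int × Int × Option Int × Int) => if (fun (_ : Int × Int × Option Int × Int) => true) m then PySem.List.pySetD a ((fun (m : Int × Int × Option Int × Int) => m.1) m) ((fun (m : Int × Int × Option Int × Int) => some (pvOrd bq - pvOrd m.2.1)) m) else a) st.2.1 m,
           (fun (a : List (Option Int)) (m : Int × Int × Option Int × Int) => if (fun (m : Int × Int × Option Int × Int) => decide (m.2.1 = bq ∧ m.2.2.1 ≠ none ∧ pref ≠ none)) m then PySem.List.pySetD a ((fun (m : Int × Int × Option Int × Int) => m.1) m) ((fun (m : Int × Int × Option Int × Int) => some (if bq = -1 then max 0 (pref.getD 0 - m.2.2.1.getD 0) else max 0 (m.2.2.1.getD 0 - pref.getD 0))) m) else a) st.2.2 m)) := by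
        funext st m
        simp only [pvStepB]
        by_cases h : m.2.1 = bq ∧ m.2.2.1 ≠ none ∧ pref ≠ none
        · simp [h]
        · simp [h]
      have hcomp1 := pv_comp_eq (i1 :: rest) (pvRecs qs ds) (fun r => r.1)
        (fun _ => true) (fun i => some (1 + (S.countP (fun v => decide (v < pvKeyE qs ds i)) : Int)))
        (fun _ => true) (fun m => some (1 + (S.countP (fun k2 => decide (k2 < m.2.2.2)) : Int)))
        hpermC hndC hrangeC (fun r _ => rfl)
        (fun r hr => by
          show some (1 + (S.countP (fun v => decide (v < pvKeyE qs ds r.1)) : Int))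
              = some (1 + (S.countP (fun k2 => decide (k2 < r.2.2.2)) : Int))
          rw [hkeymap r hr])
      have hcomp2 := pv_comp_eq (i1 :: rest) (pvRecs qs ds) (fun r => r.1)
        (fun _ => true) (fun i => some (pvOrd bq - pvOrd (((PySem.List.pyGet? qs i).getD none).getD 0)))
        (fun _ => true) (fun m => some (pvOrd bq - pvOrd m.2.1))
        hpermC hndC hrangeC (fun r _ => rfl)
        (fun r hr => by
          show some (pvOrd bq - pvOrd (((PySem.List.pyGet? qs r.1).getD none).getD 0))
              = some (pvOrd bq - pvOrd r.2.1)
          rw [(hfacts r hr).1]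
          rfl)
      have hcomp3 := pv_comp_eq (i1 :: rest) (pvRecs qs ds) (fun r => r.1)
        (fun i => decide ((PySem.List.pyGet? qs i).getD none = some bq ∧ (PySem.List.pyGet? ds i).getD none ≠ none ∧ pref ≠ none))
        (fun i => some (if bq = -1 then max 0 (pref.getD 0 - ((PySem.List.pyGet? ds i).getD none).getD 0) else max 0 (((PySem.List.pyGet? ds i).getD none).getD 0 - pref.getD 0)))
        (fun m => decide (m.2.1 = bq ∧ m.2.2.1 ≠ none ∧ pref ≠ none))
        (fun m => some (if bq = -1 then max 0 (pref.getD 0 - m.2.2.1.getD 0) else max 0 (m.2.2.1.getD 0 - pref.getD 0)))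
        hpermC hndC hrangeC
        (fun r hr => by
          show decide ((PySem.List.pyGet? qs r.1).getD none = some bq ∧ (PySem.List.pyGet? ds r.1).getD none ≠ none ∧ pref ≠ none)
              = decide (r.2.1 = bq ∧ r.2.2.1 ≠ none ∧ pref ≠ none)
          rw [(hfacts r hr).1, (hfacts r hr).2.2.1]
          simp)
        (fun r hr => by
          show some (if bq = -1 then max 0 (pref.getD 0 - ((PySem.List.pyGet? ds r.1).getD none).getD 0) else max 0 (((PySem.List.pyGet? ds r.1).getD none).getD 0 - pref.getD 0))
              = some (if bq = -1 then max 0 (pref.getD 0 - r.2.2.1.getD 0) else max 0 (r.2.2.1.getD 0 - pref.getD 0))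
          rw [(hfacts r hr).2.2.1])
      have hfoldP : (i1 :: rest).foldl (pvStepP qs ds S bq pref) (pvR0, pvR0, pvR0)
          = ((i1 :: rest).foldl (fun a i => if (fun (_ : Int) => true) i then PySem.List.pySetD a i ((fun (i : Int) => some (1 + (S.countP (fun v => decide (v < pvKeyE qs ds i)) : Int))) i) else a) pvR0,
             (i1 :: rest).foldl (fun a i => if (fun (_ : Int) => true) i then PySem.List.pySetD a i ((fun (i : Int) => some (pvOrd bq - pvOrd (((PySem.List.pyGet? qs i).getD none).getD 0))) i) else a) pvR0,
             (i1 :: rest).foldl (fun a i => if (fun (i : Int) => decide ((PySem.List.pyGet? qs i).getD none = some bq ∧ (PySem.List.pyGet? ds i).getD none ≠ none ∧ pref ≠ none)) i then PySem.List.pySetD a i ((fun (i : Int) => some (if bq = -1 then max 0 (pref.getD 0 - ((PySem.List.pyGet? ds i).getD none).getD 0) else max 0 (((PySem.List.pyGet? ds i).getD none).getD 0 - pref.getD 0))) i) else a) pvR0) := by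
        rw [hstepPfun]
        exact pv_foldl_triple (fun (a : List (Option Int)) (i : Int) => if (fun (_ : Int) => true) i then PySem.List.pySetD a i ((fun (i : Int) => some (1 + (S.countP (fun v => decide (v < pvKeyE qs ds i)) : Int))) i) else a) (fun (a : List (Option Int)) (i : Int) => if (fun (_ : Int) => true) i then PySem.List.pySetD a i ((fun (i : Int) => some (pvOrd bq - pvOrd (((PySem.List.pyGet? qs i).getD none).getD 0))) i) else a) (fun (a : List (Option Int)) (i : Int) => if (fun (i : Int) => decide ((PySem.List.pyGet? qs i).getD none = some bq ∧ (PySem.List.pyGet? ds i).getD none ≠ none ∧ pref ≠ none)) i then PySem.List.pySetD a i ((fun (i : Int) => some (if bq = -1 then max 0 (pref.getD 0 - ((PySem.List.pyGet? ds i).getD none).getD 0) else max 0 (((PySem.List.pyGet? ds i).getD none).getD 0 - pref.getD 0))) i) else a) (i1 :: rest) pvR0 pvR0 pvR0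
      have hfoldB : (pvRecs qs ds).foldl (pvStepB S bq pref) (pvR0, pvR0, pvR0)
          = ((pvRecs qs ds).foldl (fun a r => if (fun (_ : Int × Int × Option Int × Int) => true) r then PySem.List.pySetD a ((fun (m : Int × Int × Option Int × Int) => m.1) r) ((fun (m : Int × Int × Option Int × Int) => some (1 + (S.countP (fun k2 => decide (k2 < m.2.2.2)) : Int))) r) else a) pvR0,
             (pvRecs qs ds).foldl (fun a r => if (fun (_ : Int × Int × Option Int × Int) => true) r then PySem.List.pySetD a ((fun (m : Int × Int × Option Int × Int) => m.1) r) ((fun (m : Int × Int × Option Int × Int) => some (pvOrd bq - pvOrd m.2.1)) r) else a) pvR0,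
             (pvRecs qs ds).foldl (fun a r => if (fun (m : Int × Int × Option Int × Int) => decide (m.2.1 = bq ∧ m.2.2.1 ≠ none ∧ pref ≠ none)) r then PySem.List.pySetD a ((fun (m : Int × Int × Option Int × Int) => m.1) r) ((fun (m : Int × Int × Option Int × Int) => some (if bq = -1 then max 0 (pref.getD 0 - m.2.2.1.getD 0) else max 0 (m.2.2.1.getD 0 - pref.getD 0))) r) else a) pvR0) := by
        rw [hstepBfun]
        exact pv_foldl_triple (fun (a : List (Option Int)) (r : Int × Int × Option Int × Int) => if (fun (_ : Int × Int × Option Int × Int) => true) r then PySem.List.pySetD a ((fun (m : Int × Int × Option Int × Int) => m.1) r) ((fun (m : Int × Int × Option Int × Int) => some (1 + (S.countP (fun k2 => decide (k2 < m.2.2.2)) : Int))) r) else a) (fun (a : List (Option Int)) (r : Int × Int × Option Int × Int) => if (fun (_ : Int × Int × Option Int × Int) => true) r then PySem.List.pySetD a ((fun (m : Int × Int × Option Int × Int) => m.1) r) ((fun (m : Int × Int × Option Int × Int) => some (pvOrd bq - pvOrd m.2.1)) r) else a) (fun (a : List (Option Int)) (r : Int × Int × Option Int × Int) => if (fun (m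 : Int × Int × Option Int × Int) => decide (m.2.1 = bq ∧ m.2.2.1 ≠ none ∧ pref ≠ none)) r then PySem.List.pySetD a ((fun (m : Int × Int × Option Int × Int) => m.1) r) ((fun (m : Int × Int × Option Int × Int) => some (if bq = -1 then max 0 (pref.getD 0 - m.2.2.1.getD 0) else max 0 (m.2.2.1.getD 0 - pref.getD 0))) r) else a) (pvRecs qs ds) pvR0 pvR0 pvR0
      rw [hfoldP, hfoldB]
      exact Prod.ext hcomp1 (Prod.ext hcomp2 hcomp3)
    -- A's stateful walk over the sorted list is the pure fold
    have hloop : ∀ (bq : Int) (pref : Option Int),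
        ((i1 :: rest).foldl (pvStepA qs ds bq pref) (none, 0, pvR0, pvR0, pvR0)).2.2
          = (pvRecs qs ds).foldl (pvStepB S bq pref) (pvR0, pvR0, pvR0) := by
      intro bq pref
      have hpw2 : (i1 :: rest).Pairwise (fun a b => pvKeyE qs ds a ≤ pvKeyE qs ds b) := by
        rw [← hcons]; exact hpw
      have hpwc := List.pairwise_cons.1 hpw2
      have hmemsorted : ∀ i ∈ i1 :: rest, i ∈ pvLegal qs := by
        intro i hi
        exact hperm.mem_iff.1 (by rw [hcons]; exact hi)
      have hz : (List.countP (fun v => decide (v < pvKeyE qs ds i1)) S) = 0 := by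
        rw [List.countP_eq_zero]
        intro v hv
        simp only [decide_eq_true_eq, not_lt]
        rcases List.mem_map.1 (hSrev v hv) with ⟨y, hy, rfl⟩
        exact hheadmin y hy
      have hstep1 : pvStepA qs ds bq pref (none, 0, pvR0, pvR0, pvR0) i1
          = (some (pvKeyA qs ds i1), 1, pvStepP qs ds S bq pref (pvR0, pvR0, pvR0) i1) := by
        simp only [pvStepA, pvStepP]
        simp [hz]
      have hsplit1 : (1 : Int) = (S.countP (fun v => decide (v ≤ pvEnc (pvKeyA qs ds i1))) : Int) := by
        have : pvEnc (pvKeyA qs ds i1) = pvKeyE qs ds i1 := rfl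
        rw [this, pv_countP_le_split _ S hSnd (hSkey i1 hi1L), hz]
        norm_num
      have hwalk := pv_walkA qs ds S bq pref hSnd rest (pvKeyA qs ds i1) 1
        (pvStepP qs ds S bq pref (pvR0, pvR0, pvR0) i1)
        hpwc.2
        (fun j hj => hpwc.1 j hj)
        (fun j hj => hSkey j (hmemsorted j (by simp [hj])))
        (fun j hj => hboundL j (hmemsorted j (by simp [hj])))
        (hboundL i1 hi1L)
        (fun v hv => by
          rcases List.mem_map.1 (hSrev v hv) with ⟨y, hy, rfl⟩
          have hys : y ∈ i1 :: rest := by rw [← hcons]; exact hperm.mem_iff.2 hy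
          rcases List.mem_cons.1 hys with rfl | hyr
          · exact Or.inl (le_refl _)
          · exact Or.inr (List.mem_map_of_mem hyr))
        (hSkey i1 hi1L)
        hsplit1
      calc ((i1 :: rest).foldl (pvStepA qs ds bq pref) (none, 0, pvR0, pvR0, pvR0)).2.2
          = (rest.foldl (pvStepA qs ds bq pref) (pvStepA qs ds bq pref (none, 0, pvR0, pvR0, pvR0) i1)).2.2 := rfl
        _ = (rest.foldl (pvStepA qs ds bq pref) (some (pvKeyA qs ds i1), 1, pvStepP qs ds S bq pref (pvR0, pvR0, pvR0) i1)).2.2 := by rw [hstep1]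
        _ = rest.foldl (pvStepP qs ds S bq pref) (pvStepP qs ds S bq pref (pvR0, pvR0, pvR0) i1) := hwalk
        _ = (i1 :: rest).foldl (pvStepP qs ds S bq pref) (pvR0, pvR0, pvR0) := rfl
        _ = (pvRecs qs ds).foldl (pvStepB S bq pref) (pvR0, pvR0, pvR0) := hcompare bq pref
    -- assemble
    rw [hsm, hcons] at hbq
    rw [hsm, hcons]
    unfold pvOutA' pvOutB'
    rw [if_neg (by simp : ¬(i1 :: rest = [])), if_neg hrecs_ne]
    show ((i1 :: rest).foldl (pvStepA qs ds (pvBqAOf qs (i1 :: rest))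
            (pvPrefOf (pvBestDsAOf qs ds (pvBqAOf qs (i1 :: rest))) (pvBqAOf qs (i1 :: rest))))
          (none, 0, pvR0, pvR0, pvR0)).2.2
        = (pvRecs qs ds).foldl
            (pvStepB (PySem.Set.ofList ((pvRecs qs ds).map (fun m => m.2.2.2))) (pvBqBOf (pvRecs qs ds))
              (pvPrefOf (pvBestDsBOf (pvRecs qs ds) (pvBqBOf (pvRecs qs ds))) (pvBqBOf (pvRecs qs ds))))
            (pvR0, pvR0, pvR0)
    rw [hbq, hbds, ← hSdef]
    exact hloop (pvBqBOf (pvRecs qs ds))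
      (pvPrefOf (pvBestDsBOf (pvRecs qs ds) (pvBqBOf (pvRecs qs ds))) (pvBqBOf (pvRecs qs ds)))
-- ===== VERDICT (by name: the statement is the Claim_ definition above) =====
theorem compute_action_ranks_spec : Claim_equal_compute_action_ranks := by
  intro sol hDom hPre
  unfold Spec_compute_action_ranks
  obtain ⟨h1, h2, h3⟩ := hPre
  unfold Dom_compute_action_ranks at hDom
  have hmv : pvMoves (pvQs sol) (pvDs sol) = pvRecs (pvQs sol) (pvDs sol) :=
    pv_moves_eq_recs (pvQs sol) (pvDs sol)
  rw [pvA_def, pvB_def, hmv]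
  apply pv_out_eq
  · intro n hn hne
    exact h3 ⟨n, hn⟩ hne
  · intro x hx d hxd
    subst hxd
    cases hq2 : PySem.Dict.get? (⟨sol⟩ : PySem.Dict String (List (Option Int))) "dtt_action" with
    | none => exact absurd hq2 h2
    | some ds0 =>
      have hds : pvDs sol = ds0 := by unfold pvDs; rw [hq2]; rfl
      rw [hds] at hx
      have hex : ∃ p, sol.find? (fun p => p.1 == "dtt_action") = some p ∧ p.2 = ds0 := by
        unfold PySem.Dict.get? at hq2
        exact Option.map_eq_some_iff.1 hq2
      rcases hex with ⟨p, hfind, hp2⟩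
      have hpmem : p ∈ sol := List.mem_of_find?_eq_some hfind
      have hall := List.all_eq_true.1 hDom p hpmem
      have hall2 : ds0.all (fun y2_ => ((y2_.map (fun y3_ => (pvDomInt y3_))).getD true)) = true := by
        rw [Bool.and_eq_true] at hall
        rw [← hp2]
        exact hall.2
      have hx' := List.all_eq_true.1 hall2 (some d) hx
      simp only [Option.map_some, Option.getD_some, pvDomInt] at hx'
      have hb := of_decide_eq_true hx'
      have e : ((2:Int)^31) = 2147483648 := by norm_num
      rw [e]
      exact hb
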